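-- pv_equiv track=rewrite | github.com/jfdenboer/daily_light | spurgeon/services/tts/utils.py | _find_split_position
-- ===== SOURCE A (Python) =====
-- def _find_split_position(text: str, hard_limit: int) -> int:
--     soft_targets = [" ", ",", ";", ":"]
--     max_pos = min(hard_limit, len(text))
--     min_pos = max(max_pos - 300, 1)
--     for idx in range(max_pos, min_pos - 1, -1):
--         if text[idx - 1 : idx] in soft_targets:
--             return idx
--     return max_pos
-- ===== SOURCE B (Python) =====
-- def _find_split_position(text: str, hard_limit: int) -> int:
--     max_pos = min(hard_limit, len(text))
--     min_pos = max(max_pos - 300, 1)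
--     if max_pos < min_pos:
--         return max_pos
--     offset = min_pos - 1
--     s = text[offset:max_pos]
--     best = -1
--     for sep in [" ", ",", ";", ":"]:
--         p = s.rfind(sep)
--         if p >= 0:
--             best = max(best, offset + p)
--     return best + 1 if best >= 0 else max_pos
-- ===== Notes on version B (the rewrite author's own statement) =====
-- stated objective: idiomatic
-- what changed: A's explicit backward per-position scan over range(max_pos, min_pos-1, -1) is replaced by one rfind per separator over the window slice text[min_pos-1:max_pos] plus a max aggregation of the hit positions (empty window falls back to max_pos).
import Mathlib
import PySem

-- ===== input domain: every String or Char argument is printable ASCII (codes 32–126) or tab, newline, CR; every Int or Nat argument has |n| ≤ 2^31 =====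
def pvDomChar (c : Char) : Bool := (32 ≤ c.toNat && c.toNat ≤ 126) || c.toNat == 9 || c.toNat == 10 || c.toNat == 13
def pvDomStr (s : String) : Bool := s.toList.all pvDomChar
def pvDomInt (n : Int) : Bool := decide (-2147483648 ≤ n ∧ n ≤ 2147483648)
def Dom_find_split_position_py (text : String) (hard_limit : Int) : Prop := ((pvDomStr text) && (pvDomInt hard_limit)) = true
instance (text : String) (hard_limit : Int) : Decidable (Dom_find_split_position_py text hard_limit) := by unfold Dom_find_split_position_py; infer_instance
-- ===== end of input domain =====

-- B replaces A's explicit backward per-position scan with one rfind per separator over the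
-- window slice plus a max aggregation (idiomatic; return value only, no side effects involved).

-- ===== PORT A =====
-- A scans idx = max_pos, max_pos-1, …, min_pos and returns the first idx whose char
-- text[idx-1:idx] is a soft target (early return ported as List.find?), else max_pos.
def find_split_position_py (text : String) (hard_limit : Int) : Int :=
  let soft_targets : List String := [" ", ",", ";", ":"]
  let max_pos : Int := min hard_limit (PySem.Str.len text)
  let min_pos : Int := max (max_pos - 300) 1
  match (PySem.List.pyRange max_pos (min_pos - 1) (-1)).find?
      (fun idx => decide (PySem.Str.slice text (some (idx - 1)) (some idx) ∈ soft_targets)) with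
  | some idx => idx
  | none => max_pos

-- ===== PORT B =====
def find_split_position_py_alt (text : String) (hard_limit : Int) : Int :=
  let max_pos : Int := min hard_limit (PySem.Str.len text)
  let min_pos : Int := max (max_pos - 300) 1
  if max_pos < min_pos then max_pos
  else
    let offset : Int := min_pos - 1
    let s : String := PySem.Str.slice text (some offset) (some max_pos)
    let best : Int := ([" ", ",", ";", ":"] : List String).foldl
      (fun best sep =>
        let p := PySem.Str.rfind s sep
        if p ≥ 0 then max best (offset + p) else best) (-1)
    if best ≥ 0 then best + 1 else max_pos

-- ===== PRECONDITION & SPEC =====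
def Spec_find_split_position_py (text : String) (hard_limit : Int) (out : Int) : Prop := out = find_split_position_py_alt text hard_limit
instance (text : String) (hard_limit : Int) (out : Int) : Decidable (Spec_find_split_position_py text hard_limit out) := by unfold Spec_find_split_position_py; infer_instance

-- ===== CLAIM (what is proved, stated in full; the proofs are below) =====
def Claim_equal_find_split_position_py : Prop := ∀ (text : String) (hard_limit : Int), Dom_find_split_position_py text hard_limit → Spec_find_split_position_py text hard_limit (find_split_position_py text hard_limit)

-- ===== LEMMAS AND PROOFS =====

-- last index i ≤ k-1 with w[i] = c, as an Int, -1 if none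
def lastChN (w : List Char) (c : Char) : Nat → Int
  | 0 => -1
  | k+1 => if w[k]? = some c then (k : Int) else lastChN w c k

-- last index i ≤ k-1 with w[i] a soft separator, -1 if none
def lastSepN (w : List Char) : Nat → Int
  | 0 => -1
  | k+1 =>
    match w[k]? with
    | some c => if c = ' ' ∨ c = ',' ∨ c = ';' ∨ c = ':' then (k : Int) else lastSepN w k
    | none => lastSepN w k

lemma lastChN_lt (w : List Char) (c : Char) (k : Nat) : lastChN w c k < k := by
  induction k with
  | zero => simp [lastChN]
  | succ k ih => unfold lastChN; split <;> omega

lemma lastChN_ge (w : List Char) (c : Char) (k : Nat) : -1 ≤ lastChN w c k := by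
  induction k with
  | zero => simp [lastChN]
  | succ k ih => unfold lastChN; split <;> omega

lemma prefix_single (c : Char) (xs : List Char) :
    [c].isPrefixOf xs = true ↔ xs[0]? = some c := by
  cases xs with
  | nil => simp [List.isPrefixOf]
  | cons a t =>
    simp [List.isPrefixOf]
    exact ⟨fun h => h.symm, fun h => h.symm⟩

lemma go_eq (w : List Char) (c : Char) (j : Nat) :
    PySem.Chars.rfind.go w [c] j = lastChN w c (j + 1) := by
  induction j with
  | zero =>
    show (if [c].isPrefixOf w = true then (0:Int) else -1) = _
    simp only [lastChN, prefix_single]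
    norm_num
  | succ j ih =>
    show (if [c].isPrefixOf (w.drop (j+1)) = true then ((j:Int)+1) else PySem.Chars.rfind.go w [c] j) = _
    have hpre : ([c].isPrefixOf (w.drop (j+1)) = true) ↔ (w[j+1]? = some c) := by
      rw [prefix_single, List.getElem?_drop]
    rw [ih]
    simp only [lastChN, hpre]
    by_cases h : w[j+1]? = some c
    · rw [if_pos h, if_pos h]; push_cast; ring
    · rw [if_neg h, if_neg h]

lemma lastChN_stable (w : List Char) (c : Char) (k : Nat) (h : w.length ≤ k) :
    lastChN w c (k + 1) = lastChN w c k := by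
  have hn : w[k]? = none := by rw [List.getElem?_eq_none_iff]; omega
  simp only [lastChN, hn]
  simp

lemma rfind_single (w : List Char) (c : Char) :
    PySem.Chars.rfind w [c] = lastChN w c w.length := by
  show PySem.Chars.rfind.go w [c] w.length = _
  rw [go_eq, lastChN_stable _ _ _ le_rfl]

lemma lastChN_take (w : List Char) (c : Char) (m k : Nat) (h : k ≤ m) :
    lastChN (w.take m) c k = lastChN w c k := by
  induction k with
  | zero => rfl
  | succ k ih =>
    simp only [lastChN]
    rw [List.getElem?_take_of_lt (by omega), ih (by omega)]

lemma maxCh (w : List Char) (k : Nat) :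
    max (max (max (lastChN w ' ' k) (lastChN w ',' k)) (lastChN w ';' k)) (lastChN w ':' k)
      = lastSepN w k := by
  induction k with
  | zero => simp [lastChN, lastSepN]
  | succ k ih =>
    have h1 := lastChN_lt w ' ' k
    have h2 := lastChN_lt w ',' k
    have h3 := lastChN_lt w ';' k
    have h4 := lastChN_lt w ':' k
    simp only [lastChN, lastSepN]
    cases hw : w[k]? with
    | none => exact ih
    | some c =>
      simp only [Option.some.injEq]
      by_cases hc : c = ' ' ∨ c = ',' ∨ c = ';' ∨ c = ':'
      · rcases hc with rfl | rfl | rfl | rfl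
        · rw [if_pos rfl, if_neg (show (' ':Char) ≠ ',' by decide),
              if_neg (show (' ':Char) ≠ ';' by decide), if_neg (show (' ':Char) ≠ ':' by decide),
              if_pos (show (' ':Char) = ' ' ∨ (' ':Char) = ',' ∨ (' ':Char) = ';' ∨ (' ':Char) = ':' by tauto)]
          rw [max_eq_left h2.le, max_eq_left h3.le, max_eq_left h4.le]
        · rw [if_neg (show (',':Char) ≠ ' ' by decide), if_pos rfl,
              if_neg (show (',':Char) ≠ ';' by decide), if_neg (show (',':Char) ≠ ':' by decide),
              if_pos (show (',':Char) = ' ' ∨ (',':Char) = ',' ∨ (',':Char) = ';' ∨ (',':Char) = ':' by tauto)]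
          rw [max_eq_right h1.le, max_eq_left h3.le, max_eq_left h4.le]
        · rw [if_neg (show (';':Char) ≠ ' ' by decide), if_neg (show (';':Char) ≠ ',' by decide),
              if_pos rfl, if_neg (show (';':Char) ≠ ':' by decide),
              if_pos (show (';':Char) = ' ' ∨ (';':Char) = ',' ∨ (';':Char) = ';' ∨ (';':Char) = ':' by tauto)]
          rw [max_eq_right (max_le h1.le h2.le), max_eq_left h4.le]
        · rw [if_neg (show (':':Char) ≠ ' ' by decide), if_neg (show (':':Char) ≠ ',' by decide),
              if_neg (show (':':Char) ≠ ';' by decide), if_pos rfl,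
              if_pos (show (':':Char) = ' ' ∨ (':':Char) = ',' ∨ (':':Char) = ';' ∨ (':':Char) = ':' by tauto)]
          rw [max_eq_right (max_le (max_le h1.le h2.le) h3.le)]
      · rw [if_neg (show ¬ (c = ' ') by tauto), if_neg (show ¬ (c = ',') by tauto),
            if_neg (show ¬ (c = ';') by tauto), if_neg (show ¬ (c = ':') by tauto),
            if_neg hc]
        exact ih

set_option maxHeartbeats 2000000 in
lemma foldGuard (o r1 r2 r3 r4 : Int) (ho : 0 ≤ o)
    (g1 : -1 ≤ r1) (g2 : -1 ≤ r2) (g3 : -1 ≤ r3) (g4 : -1 ≤ r4) :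
    (if r4 ≥ 0 then max (if r3 ≥ 0 then max (if r2 ≥ 0 then max (if r1 ≥ 0 then max (-1 : Int) (o + r1) else (-1 : Int)) (o + r2) else (if r1 ≥ 0 then max (-1 : Int) (o + r1) else (-1 : Int))) (o + r3) else (if r2 ≥ 0 then max (if r1 ≥ 0 then max (-1 : Int) (o + r1) else (-1 : Int)) (o + r2) else (if r1 ≥ 0 then max (-1 : Int) (o + r1) else (-1 : Int)))) (o + r4) else (if r3 ≥ 0 then max (if r2 ≥ 0 then max (if r1 ≥ 0 then max (-1 : Int) (o + r1) else (-1 : Int)) (o + r2) else (if r1 ≥ 0 then max (-1 : Int) (o + r1) else (-1 : Int))) (o + r3) else (if r2 ≥ 0 then max (if r1 ≥ 0 then max (-1 : Int) (o + r1) else (-1 : Int)) (o + r2) else (if r1 ≥ 0 then max (-1 : Int) (o + r1) else (-1 : Int)))))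
      = if max (max (max r1 r2) r3) r4 ≥ 0 then o + max (max (max r1 r2) r3) r4 else -1 := by
  simp only [Int.max_def]
  split_ifs <;> omega

-- the soft-target membership test of A, reduced to a character test
lemma mem_soft_iff (text : String) (a : Int) (h0 : 0 ≤ a) (hn : a.toNat < text.toList.length) :
    (PySem.Str.slice text (some a) (some (a + 1)) ∈ ([" ", ",", ";", ":"] : List String))
      ↔ (text.toList[a.toNat]'hn = ' ' ∨ text.toList[a.toNat]'hn = ',' ∨
         text.toList[a.toNat]'hn = ';' ∨ text.toList[a.toNat]'hn = ':') := by
  have hs : (PySem.Str.slice text (some a) (some (a + 1))).toList = [text.toList[a.toNat]'hn] := by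
    rw [PySem.Str.toList_slice, PySem.Chars.slice_eq_listSlice,
        PySem.List.slice_toNat (ha := h0) (hb := by omega)]
    have h1 : (a + 1).toNat - a.toNat = 1 := by omega
    rw [h1, List.take_one]
    have h2 : (text.toList.drop a.toNat).head? = some (text.toList[a.toNat]'hn) := by
      rw [List.head?_drop]
      simp
    simp [h2]
  have key : ∀ (t : String), (PySem.Str.slice text (some a) (some (a + 1)) = t)
      ↔ ([text.toList[a.toNat]'hn] = t.toList) := by
    intro t
    rw [← String.toList_inj, hs]
  simp only [List.mem_cons, List.not_mem_nil, or_false, key]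
  constructor
  · rintro (h | h | h | h)
    · left; simpa using h
    · right; left; simpa using h
    · right; right; left; simpa using h
    · right; right; right; simpa using h
  · rintro (h | h | h | h)
    · left; rw [h]; rfl
    · right; left; rw [h]; rfl
    · right; right; left; rw [h]; rfl
    · right; right; right; rw [h]; rfl

-- A's backward scan from o+k down to o+1 finds exactly o + lastSepN (drop o) k + 1
lemma findA (text : String) (o : Int) (ho : 0 ≤ o) :
    ∀ (k : Nat), o + k ≤ (text.toList.length : Int) →
    (PySem.List.pyRange (o + k) o (-1)).find?
        (fun idx => decide (PySem.Str.slice text (some (idx - 1)) (some idx) ∈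
          ([" ", ",", ";", ":"] : List String)))
      = (if lastSepN (text.toList.drop o.toNat) k ≥ 0
          then some (o + lastSepN (text.toList.drop o.toNat) k + 1) else none) := by
  intro k
  induction k with
  | zero =>
    intro hk
    rw [show o + (0:Nat) = o by push_cast; ring, PySem.List.pyRange_neg_one_eq_nil le_rfl]
    simp [lastSepN]
  | succ k ih =>
    intro hk
    have hcons := PySem.List.pyRange_neg_one_cons (a := o + ((k:Nat)+1)) (b := o) (by omega)
    push_cast at hcons hk ⊢
    have e1 : o + ((k:Int) + 1) - 1 = o + k := by ring
    have e2 : o + ((k:Int) + 1) = o + k + 1 := by ring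
    rw [hcons, e1, e2, List.find?_cons]
    have hlt : (o + (k:Int)).toNat < text.toList.length := by omega
    have ht : (o + (k:Int)).toNat = o.toNat + k := by omega
    have hwk : (text.toList.drop o.toNat)[k]? = some (text.toList[(o + (k:Int)).toNat]'hlt) := by
      rw [List.getElem?_drop, ← ht]
      simp
    have hmem := mem_soft_iff text (o + k) (by omega) hlt
    have hsep : lastSepN (text.toList.drop o.toNat) (k+1)
        = if (text.toList[(o + (k:Int)).toNat]'hlt = ' ' ∨ text.toList[(o + (k:Int)).toNat]'hlt = ',' ∨
             text.toList[(o + (k:Int)).toNat]'hlt = ';' ∨ text.toList[(o + (k:Int)).toNat]'hlt = ':')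
          then (k : Int) else lastSepN (text.toList.drop o.toNat) k := by
      simp only [lastSepN, hwk]
    by_cases hc : (text.toList[(o + (k:Int)).toNat]'hlt = ' ' ∨ text.toList[(o + (k:Int)).toNat]'hlt = ',' ∨
        text.toList[(o + (k:Int)).toNat]'hlt = ';' ∨ text.toList[(o + (k:Int)).toNat]'hlt = ':')
    · have hP : (decide (PySem.Str.slice text (some (o + (k:Int) + 1 - 1)) (some (o + (k:Int) + 1)) ∈
          ([" ", ",", ";", ":"] : List String))) = true := by
        rw [decide_eq_true_iff, show o + (k:Int) + 1 - 1 = o + k from by ring]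
        exact hmem.mpr hc
      simp only [hP]
      rw [hsep, if_pos hc, if_pos (by omega : (k:Int) ≥ 0)]
    · have hP : (decide (PySem.Str.slice text (some (o + (k:Int) + 1 - 1)) (some (o + (k:Int) + 1)) ∈
          ([" ", ",", ";", ":"] : List String))) = false := by
        rw [decide_eq_false_iff_not, show o + (k:Int) + 1 - 1 = o + k from by ring]
        exact fun h => hc (hmem.mp h)
      simp only [hP]
      rw [hsep, if_neg hc]
      exact ih (by omega)

-- ===== VERDICT (by name: the statement is the Claim_ definition above) =====
theorem find_split_position_py_spec : Claim_equal_find_split_position_py := by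
  intro text hard_limit _
  unfold Spec_find_split_position_py
  simp only [find_split_position_py, find_split_position_py_alt, PySem.Str.len_eq]
  by_cases hlt1 : min hard_limit (text.toList.length : Int) < 1
  · have hminpos : max (min hard_limit (text.toList.length : Int) - 300) 1 = 1 := by omega
    rw [hminpos, show (1:Int) - 1 = 0 from rfl,
        PySem.List.pyRange_neg_one_eq_nil (by omega), if_pos (by omega)]
    rfl
  · set mp : Int := min hard_limit (text.toList.length : Int) with hmp
    have h1mp : (1:Int) ≤ mp := by omega
    have hmpN : mp ≤ (text.toList.length : Int) := by omega
    set o : Int := max (mp - 300) 1 - 1 with ho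
    have ho0 : 0 ≤ o := by omega
    have homp : o < mp := by omega
    set k : Nat := (mp - o).toNat with hkdef
    have hk : mp = o + (k:Int) := by omega
    have hkN : o + (k:Int) ≤ (text.toList.length : Int) := by omega
    rw [if_neg (by omega : ¬ mp < max (mp - 300) 1)]
    rw [hk, findA text o ho0 k hkN]
    set W : List Char := text.toList.drop o.toNat with hW
    have hWlen : k ≤ W.length := by
      rw [hW, List.length_drop]; omega
    set s : String := PySem.Str.slice text (some o) (some (o + (k:Int))) with hs
    have hsl : s.toList = W.take k := by
      rw [hs, PySem.Str.toList_slice, PySem.Chars.slice_eq_listSlice,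
          PySem.List.slice_toNat (ha := ho0) (hb := by omega), hW]
      congr 1
      omega
    have htk : (W.take k).length = k := by
      rw [List.length_take]; omega
    have hr : ∀ (t : String) (c : Char), t.toList = [c] →
        PySem.Str.rfind s t = lastChN W c k := by
      intro t c htc
      rw [PySem.Str.rfind_eq, htc, hsl, rfind_single, htk, lastChN_take _ _ _ _ le_rfl]
    simp only [List.foldl]
    rw [hr " " ' ' rfl, hr "," ',' rfl, hr ";" ';' rfl, hr ":" ':' rfl]
    rw [foldGuard o _ _ _ _ ho0 (lastChN_ge W ' ' k) (lastChN_ge W ',' k)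
        (lastChN_ge W ';' k) (lastChN_ge W ':' k), maxCh]
    by_cases hS : lastSepN W k ≥ 0
    · rw [if_pos hS, if_pos hS, if_pos (by omega : o + lastSepN W k ≥ 0)]
    · rw [if_neg hS, if_neg hS, if_neg (by omega : ¬ (-1:Int) ≥ 0)]
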